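-- pv_equiv track=rewrite | github.com/anjumwahid/sabpaisa-automation-suite | run_parallel_clients.py | _match_canonical
-- ===== SOURCE A (Python) =====
-- def _match_canonical(item, canonical_list):
--     """Find which canonical column an item belongs to.
--     Case-insensitive exact first, then substring both directions.
--     Returns the canonical column name or None."""
--     low = item.lower()
--     for col in canonical_list:
--         if col.lower() == low:
--             return col
--     for col in canonical_list:
--         if col.lower() in low or low in col.lower():
--             return col
--     return None
-- ===== SOURCE B (Python) =====
-- def _match_canonical(item, canonical_list):
--     """Single pass: exact match returns immediately; the first substring
--     candidate is remembered and returned only if no exact match exists."""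
--     low = item.lower()
--     candidate = None
--     for col in canonical_list:
--         lc = col.lower()
--         if lc == low:
--             return col
--         if candidate is None and (lc in low or low in lc):
--             candidate = col
--     return candidate
-- ===== Notes on version B (the rewrite author's own statement) =====
-- stated objective: alternative
-- what changed: Fuses A's two scans (exact pass, then substring pass) into one pass that returns on the first exact match while remembering the first substring candidate.
import Mathlib
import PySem

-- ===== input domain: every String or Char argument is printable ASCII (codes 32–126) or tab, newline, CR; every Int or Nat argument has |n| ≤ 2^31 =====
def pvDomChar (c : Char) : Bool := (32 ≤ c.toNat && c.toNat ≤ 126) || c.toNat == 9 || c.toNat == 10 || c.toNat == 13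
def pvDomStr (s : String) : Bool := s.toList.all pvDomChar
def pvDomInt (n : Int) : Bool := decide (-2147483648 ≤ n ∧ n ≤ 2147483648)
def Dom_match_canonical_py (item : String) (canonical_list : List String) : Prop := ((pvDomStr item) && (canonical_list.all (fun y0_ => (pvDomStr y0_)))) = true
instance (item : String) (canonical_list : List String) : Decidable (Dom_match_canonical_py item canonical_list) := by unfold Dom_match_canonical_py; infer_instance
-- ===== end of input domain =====

-- B fuses A's two scans (exact, then substring) into one pass that keeps the first substring candidate; same cost, different structure.
-- ===== PORT A =====
-- first loop of A: return the first col with col.lower() == low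
def pvExactScan (low : String) : List String → Option String
  | [] => none
  | col :: rest =>
    if PySem.Str.lower col == low then some col else pvExactScan low rest

-- second loop of A: return the first col with col.lower() in low or low in col.lower()
def pvSubScan (low : String) : List String → Option String
  | [] => none
  | col :: rest =>
    if PySem.Str.isIn (PySem.Str.lower col) low || PySem.Str.isIn low (PySem.Str.lower col)
    then some col else pvSubScan low rest

def match_canonical_py (item : String) (canonical_list : List String) : Option String :=
  let low := PySem.Str.lower item
  match pvExactScan low canonical_list with
  | some col => some col
  | none => pvSubScan low canonical_list

-- ===== PORT B =====
-- single pass of B: exact match returns at once; first substring candidate is kept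
def pvAltGo (low : String) (cand : Option String) : List String → Option String
  | [] => cand
  | col :: rest =>
    let lc := PySem.Str.lower col
    if lc == low then some col
    else
      pvAltGo low
        (if cand.isNone && (PySem.Str.isIn lc low || PySem.Str.isIn low lc)
         then some col else cand) rest

def match_canonical_py_alt (item : String) (canonical_list : List String) : Option String :=
  pvAltGo (PySem.Str.lower item) none canonical_list

-- ===== PRECONDITION & SPEC =====
def Spec_match_canonical_py (item : String) (canonical_list : List String) (out : Option String) : Prop := out = match_canonical_py_alt item canonical_list
instance (item : String) (canonical_list : List String) (out : Option String) : Decidable (Spec_match_canonical_py item canonical_list out) := by unfold Spec_match_canonical_py; infer_instance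

-- ===== CLAIM (what is proved, stated in full; the proofs are below) =====
def Claim_equal_match_canonical_py : Prop := ∀ (item : String) (canonical_list : List String), Dom_match_canonical_py item canonical_list → Spec_match_canonical_py item canonical_list (match_canonical_py item canonical_list)

-- ===== LEMMAS AND PROOFS =====

-- ===== VERDICT (by name: the statement is the Claim_ definition above) =====
-- invariant of B's fused loop: exact match wins; otherwise a stored candidate wins over later substring hits
theorem pvAltGo_eq (low : String) (l : List String) :
    ∀ cand : Option String,
      pvAltGo low cand l =
        match pvExactScan low l with
        | some c => some c
        | none => match cand with
                  | some c => some c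
                  | none => pvSubScan low l := by
  induction l with
  | nil => intro cand; cases cand <;> simp [pvAltGo, pvExactScan, pvSubScan]
  | cons col rest ih =>
    intro cand
    simp only [pvAltGo, pvExactScan, pvSubScan]
    by_cases hx : PySem.Str.lower col == low
    · simp [hx]
    · simp only [hx, if_false, Bool.false_eq_true]
      cases cand with
      | some c => simp [ih]
      | none =>
        rw [ih]
        simp only [Option.isNone_none, Bool.true_and]
        by_cases hs : (PySem.Str.isIn (PySem.Str.lower col) low
            || PySem.Str.isIn low (PySem.Str.lower col)) = true
        · rw [if_pos hs, if_pos hs]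
        · rw [if_neg hs, if_neg hs]

theorem match_canonical_py_spec : Claim_equal_match_canonical_py := by
  intro item cl _
  unfold Spec_match_canonical_py match_canonical_py match_canonical_py_alt
  rw [pvAltGo_eq]
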